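-- pv_equiv track=rewrite | github.com/infinitezxl/CS61A | cs61a/discussion/disc02/ex.py | sum_every_other_digit
-- ===== SOURCE A (Python) =====
-- def sum_every_other_digit(n):
--     """
--
--     >>> sum_every_other_digit(7)
--     7
--     >>> sum_every_other_digit(30)
--     0
--     >>> sum_every_other_digit(228)
--     10
--     >>> sum_every_other_digit(123456)
--     12
--     >>> sum_every_other_digit(1234567)
--     16
--     """
--     def spilt(n):
--         return n%10,n//100
--     last,droped_two=spilt(n)
--     if n==0:
--         return 0
--     else:
--         return last+sum_every_other_digit(droped_two)
-- ===== SOURCE B (Python) =====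
-- def sum_every_other_digit(n):
--     total = 0
--     while n != 0:
--         total += n % 10
--         n //= 100
--     return total
-- ===== Notes on version B (the rewrite author's own statement) =====
-- stated objective: simpler
-- what changed: Replaces the recursive decomposition (inner split helper plus recursive call) by an iterative while-loop with a running total, avoiding Python call overhead and recursion-depth limits.
import Mathlib
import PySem

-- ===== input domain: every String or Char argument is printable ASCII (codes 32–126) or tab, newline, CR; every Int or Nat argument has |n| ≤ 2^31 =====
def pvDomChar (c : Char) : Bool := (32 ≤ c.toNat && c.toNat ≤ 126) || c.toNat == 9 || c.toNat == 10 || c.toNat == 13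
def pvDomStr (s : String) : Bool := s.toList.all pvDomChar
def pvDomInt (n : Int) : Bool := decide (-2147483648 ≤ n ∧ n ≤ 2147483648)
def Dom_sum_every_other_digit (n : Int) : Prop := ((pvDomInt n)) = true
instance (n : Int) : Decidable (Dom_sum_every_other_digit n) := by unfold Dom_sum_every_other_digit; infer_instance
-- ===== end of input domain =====

-- B replaces A's recursion by an iterative while-loop with a running total (objective: simpler).
-- A raises RecursionError on negative inputs (the recursion never bottoms out); Pre_ excludes them (B's loop would not terminate there either).

-- ===== PORT A =====
-- A's recursion is not structurally decreasing on Int, so it is expressed with a fuel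
-- parameter; fuel n.natAbs+1 exceeds the recursion depth for every n ≥ 0 (proved below),
-- so on Pre_ the port computes exactly A's recursion.
def pvAgo (fuel : Nat) (n : Int) : Int :=
  match fuel with
  | 0 => 0
  | f + 1 =>
    -- last, droped_two = spilt(n)
    let last := PySem.Int.mod n 10
    let droped_two := PySem.Int.floordiv n 100
    if n = 0 then 0 else last + pvAgo f droped_two

def sum_every_other_digit (n : Int) : Int := pvAgo (n.natAbs + 1) n

-- ===== PORT B =====
-- B's while-loop as a tail recursion on the same fuel bound, carrying the running total.
def pvBloop (fuel : Nat) (n : Int) (total : Int) : Int :=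
  match fuel with
  | 0 => total
  | f + 1 =>
    if n ≠ 0 then pvBloop f (PySem.Int.floordiv n 100) (total + PySem.Int.mod n 10)
    else total

def sum_every_other_digit_alt (n : Int) : Int := pvBloop (n.natAbs + 1) n 0

-- ===== PRECONDITION & SPEC =====
-- A raises RecursionError on negative inputs (the recursion never bottoms out); those inputs are excluded.
def Pre_sum_every_other_digit (n : Int) : Prop := 0 ≤ n
instance (n : Int) : Decidable (Pre_sum_every_other_digit n) := by unfold Pre_sum_every_other_digit; infer_instance
def pvWitness_sum_every_other_digit : Int := 1234567

def Spec_sum_every_other_digit (n : Int) (out : Int) : Prop := out = sum_every_other_digit_alt n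
instance (n : Int) (out : Int) : Decidable (Spec_sum_every_other_digit n out) := by unfold Spec_sum_every_other_digit; infer_instance

-- ===== CLAIM (what is proved, stated in full; the proofs are below) =====
def Claim_equal_sum_every_other_digit : Prop := ∀ (n : Int), Dom_sum_every_other_digit n → Pre_sum_every_other_digit n → Spec_sum_every_other_digit n (sum_every_other_digit n)

-- ===== LEMMAS AND PROOFS =====

theorem pv_drop_lt (n : Int) (h : 0 < n) :
    (PySem.Int.floordiv n 100).natAbs < n.natAbs := by
  have h1 : PySem.Int.floordiv n 100 = n / 100 :=
    PySem.Int.floordiv_eq_ediv_of_pos (by norm_num)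
  have h2 : 0 ≤ n / 100 := Int.ediv_nonneg (le_of_lt h) (by norm_num)
  have h3 : n / 100 < n := by
    have := Int.ediv_le_self (b := 100) (le_of_lt h)
    omega
  omega

theorem pv_drop_nonneg (n : Int) (h : 0 ≤ n) :
    0 ≤ PySem.Int.floordiv n 100 := by
  have h1 : PySem.Int.floordiv n 100 = n / 100 :=
    PySem.Int.floordiv_eq_ediv_of_pos (by norm_num)
  have := Int.ediv_nonneg h (show (0:Int) ≤ 100 by norm_num)
  omega

theorem pv_loop_eq (fuel : Nat) : ∀ (n total : Int), 0 ≤ n → n.natAbs < fuel →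
    pvBloop fuel n total = total + pvAgo fuel n := by
  induction fuel with
  | zero => intro n total _ h; omega
  | succ f ih =>
    intro n total hn hf
    by_cases h0 : n = 0
    · subst h0; simp [pvBloop, pvAgo]
    · have hpos : 0 < n := lt_of_le_of_ne hn (Ne.symm h0)
      have hlt := pv_drop_lt n hpos
      have hnn := pv_drop_nonneg n hn
      have hf' : (PySem.Int.floordiv n 100).natAbs < f := by omega
      simp only [pvBloop, pvAgo, ne_eq, h0, not_false_eq_true, if_true, if_false]
      rw [ih _ _ hnn hf']
      ring

-- ===== VERDICT (by name: the statement is the Claim_ definition above) =====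
theorem sum_every_other_digit_spec : Claim_equal_sum_every_other_digit := by
  intro n _ hpre
  unfold Spec_sum_every_other_digit sum_every_other_digit sum_every_other_digit_alt
  rw [pv_loop_eq _ _ _ hpre (by omega)]
  ring
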